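-- pv_equiv track=rewrite | github.com/afzalsiddique/problem-solving | Problem_Solving_Python/template/helper.py | nextLessOrEqualIndex2
-- ===== SOURCE A (Python) =====
-- def nextLessOrEqualIndex2(arr): # index of next smaller or equal element
--     # lower or equal value on the right with the smallest index. basically it is the immediate previous element in a sorted array
--     n=len(arr)
--     next_lower_or_equal=[-1 for _ in range(n)]
--     li = sorted([-a, i] for i, a in enumerate(arr))
--     st=[]
--     for a,i in li:
--         while st and st[-1]<i:
--             next_lower_or_equal[st.pop()]=i
--         st.append(i)
--     return next_lower_or_equal
-- ===== SOURCE B (Python) =====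
-- def nextLessOrEqualIndex2(arr): # index of next smaller or equal element
--     # For each j: the index i > j whose value is the largest value <= arr[j]
--     # (ties broken by smallest i), or -1 -- a direct scan instead of sort+stack.
--     res = []
--     for j, x in enumerate(arr):
--         best, bestv = -1, 0
--         for i, v in enumerate(arr[j + 1:], j + 1):
--             if v <= x and (best == -1 or bestv < v):
--                 best, bestv = i, v
--         res.append(best)
--     return res
-- ===== Notes on version B (the rewrite author's own statement) =====
-- stated objective: simpler
-- what changed: Replaced the sort-by-(-value,index) plus index-stack machinery with a direct quadratic scan: for each position j it scans the suffix once keeping the best candidate (largest value <= arr[j], ties by smallest index).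
import Mathlib
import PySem

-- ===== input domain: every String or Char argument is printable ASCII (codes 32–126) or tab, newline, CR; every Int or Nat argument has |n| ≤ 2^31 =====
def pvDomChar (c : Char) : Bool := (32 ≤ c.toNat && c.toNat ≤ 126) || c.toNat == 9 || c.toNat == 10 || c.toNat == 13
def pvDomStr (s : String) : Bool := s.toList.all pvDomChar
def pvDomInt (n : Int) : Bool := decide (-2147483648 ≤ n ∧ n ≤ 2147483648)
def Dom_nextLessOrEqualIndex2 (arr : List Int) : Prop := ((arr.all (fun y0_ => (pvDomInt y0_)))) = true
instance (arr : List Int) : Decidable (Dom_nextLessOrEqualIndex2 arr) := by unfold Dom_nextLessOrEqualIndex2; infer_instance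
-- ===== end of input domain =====

-- B replaces A's sort-by-(-value,index) + index-stack machinery by a direct quadratic
-- suffix scan keeping the best candidate; same return value, objective: simpler.

-- ===== PORT A =====
-- the inner `while st and st[-1] < i: next[st.pop()] = i` (stack top = list head)
def pvPop (next st : List Int) (i : Int) : List Int × List Int :=
  match st with
  | [] => (next, [])
  | t :: r => if t < i then pvPop (PySem.List.pySetD next t i) r i else (next, t :: r)

-- the `for a, i in li:` loop over the sorted pair list
def pvRun (next st : List Int) (li : List (Int × Int)) : List Int :=
  match li with
  | [] => next
  | (_, i) :: rest =>
      let ns := pvPop next st i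
      pvRun ns.1 (i :: ns.2) rest

def nextLessOrEqualIndex2 (arr : List Int) : List Int :=
  let n := PySem.List.len arr
  let next := (PySem.List.pyRange 0 n 1).map (fun _ => (-1 : Int))
  let li := PySem.List.sorted2 ((PySem.List.enumerate arr).map (fun p => (-p.2, p.1)))
              (fun q => q.1) (fun q => q.2)
  pvRun next [] li

-- ===== PORT B =====
-- the inner `for i, v in enumerate(arr[j+1:], j+1): if v <= x and (best == -1 or bestv < v): …`
def pvBest (x : Int) (ps : List (Int × Int)) (b : Int × Int) : Int × Int :=
  ps.foldl (fun b p => if p.2 ≤ x ∧ (b.1 = -1 ∨ b.2 < p.2) then p else b) b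

def nextLessOrEqualIndex2_alt (arr : List Int) : List Int :=
  (PySem.List.enumerate arr).foldl
    (fun res jx =>
      res ++ [(pvBest jx.2
                (PySem.List.enumerate (PySem.List.slice arr (some (jx.1 + 1)) none) (jx.1 + 1))
                (-1, 0)).1])
    []

-- ===== PRECONDITION & SPEC =====
def Spec_nextLessOrEqualIndex2 (arr : List Int) (out : List Int) : Prop := out = nextLessOrEqualIndex2_alt arr
instance (arr : List Int) (out : List Int) : Decidable (Spec_nextLessOrEqualIndex2 arr out) := by unfold Spec_nextLessOrEqualIndex2; infer_instance

-- ===== CLAIM (what is proved, stated in full; the proofs are below) =====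
def Claim_equal_nextLessOrEqualIndex2 : Prop := ∀ (arr : List Int), Dom_nextLessOrEqualIndex2 arr → Spec_nextLessOrEqualIndex2 arr (nextLessOrEqualIndex2 arr)

-- ===== LEMMAS AND PROOFS =====

-- value at (nonnegative) index i
def pvGv (arr : List Int) (i : Int) : Int := arr.getD i.toNat 0
-- i is a candidate answer for position k
def pvCand (arr : List Int) (k i : Int) : Prop := k < i ∧ i < arr.length ∧ pvGv arr i ≤ pvGv arr k
-- strict order "b's sort key (-value, index) is smaller than i's"
def pvKlt (arr : List Int) (b i : Int) : Prop := pvGv arr i < pvGv arr b ∨ (pvGv arr b = pvGv arr i ∧ b < i)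
-- b is the answer at position k: -1 and no candidate, or the key-minimal candidate
def pvIsBest (arr : List Int) (k b : Int) : Prop :=
  (b = -1 ∧ ∀ i, ¬ pvCand arr k i) ∨ (pvCand arr k b ∧ ∀ i, pvCand arr k i → pvKlt arr b i ∨ b = i)

-- first element greater than k
def pvNgAll (s : List Int) (k : Int) : Option Int := s.find? (fun y => decide (k < y))
-- first element greater than k occurring after the first occurrence of k
def pvNgAfter (s : List Int) (k : Int) : Option Int :=
  match s with
  | [] => none
  | x :: t => if x = k then pvNgAll t k else pvNgAfter t k

lemma pvKlt_asymm (arr : List Int) (a b : Int) (h1 : pvKlt arr a b) (h2 : pvKlt arr b a) : False := by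
  unfold pvKlt at *; omega

lemma pvIsBest_unique (arr : List Int) (k b1 b2 : Int) (_hk : 0 ≤ k)
    (h1 : pvIsBest arr k b1) (h2 : pvIsBest arr k b2) : b1 = b2 := by
  rcases h1 with ⟨hb1, hno1⟩ | ⟨hc1, hmin1⟩ <;> rcases h2 with ⟨hb2, hno2⟩ | ⟨hc2, hmin2⟩
  · omega
  · exact absurd hc2 (hno1 b2)
  · exact absurd hc1 (hno2 b1)
  · rcases hmin1 b2 hc2 with h12 | h12
    · rcases hmin2 b1 hc1 with h21 | h21
      · exact absurd h12 (fun h => pvKlt_asymm arr b1 b2 h h21)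
      · omega
    · exact h12

-- ---- A side ----

lemma pvPop_length (next st : List Int) (i : Int) : (pvPop next st i).1.length = next.length := by
  induction st generalizing next with
  | nil => rfl
  | cons t r ih =>
    simp only [pvPop]
    split
    · rw [ih]; exact PySem.List.length_pySetD next t i
    · rfl

lemma pvPop_stack (next st : List Int) (i : Int) :
    (pvPop next st i).2 = st.dropWhile (fun t => decide (t < i)) := by
  induction st generalizing next with
  | nil => rfl
  | cons t r ih =>
    simp only [pvPop, List.dropWhile_cons]
    split <;> simp_all

lemma pvPop_getD (next st : List Int) (i : Int) (k : Nat)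
    (hst : ∀ t ∈ st, 0 ≤ t ∧ t < next.length) :
    (pvPop next st i).1.getD k 0 =
      if (k : Int) ∈ st.takeWhile (fun t => decide (t < i)) then i else next.getD k 0 := by
  induction st generalizing next with
  | nil => simp [pvPop]
  | cons t r ih =>
    have ht0 : 0 ≤ t := (hst t (by simp)).1
    have htl : t < next.length := (hst t (by simp)).2
    simp only [pvPop, List.takeWhile_cons]
    by_cases hti : t < i
    · rw [if_pos hti]
      rw [ih _ (fun x hx => by
        have := hst x (by simp [hx]); rwa [PySem.List.length_pySetD])]
      rw [PySem.List.pySetD_of_nonneg next i ht0]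
      by_cases hkt : (k : Int) = t
      · have hts : t.toNat = k := by omega
        have hkl : k < next.length := by omega
        simp [hti, hkt, hts, List.getD, hkl]
      · have hne : t.toNat ≠ k := by omega
        simp only [hti, decide_true, if_true, List.mem_cons]
        rw [List.getD, List.getD, List.getElem?_set_ne hne]
        by_cases hm : (k : Int) ∈ r.takeWhile (fun t => decide (t < i)) <;> simp [hm, hkt]
    · rw [if_neg hti]
      simp [hti]

lemma pvRun_length (next st : List Int) (li : List (Int × Int)) :
    (pvRun next st li).length = next.length := by
  induction li generalizing next st with
  | nil => rfl
  | cons p rest ih =>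
    obtain ⟨a, i⟩ := p
    simp only [pvRun]
    rw [ih, pvPop_length]

lemma pvNgAfter_not_mem (s : List Int) (k : Int) (h : k ∉ s) : pvNgAfter s k = none := by
  induction s with
  | nil => rfl
  | cons x t ih =>
    simp only [pvNgAfter]
    rw [if_neg (by simp at h; omega)]
    exact ih (by simp at h ⊢; tauto)

lemma pvNgAfter_append_not_mem (u s : List Int) (k : Int) (h : k ∉ u) :
    pvNgAfter (u ++ s) k = pvNgAfter s k := by
  induction u with
  | nil => rfl
  | cons x t ih =>
    simp only [List.cons_append, pvNgAfter]
    rw [if_neg (by simp at h; omega)]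
    exact ih (by simp at h ⊢; tauto)

lemma pvDropWhile_ge (st : List Int) (i : Int) (hsort : st.Pairwise (· ≤ ·)) :
    ∀ t ∈ st.dropWhile (fun t => decide (t < i)), i ≤ t := by
  induction st with
  | nil => simp
  | cons x r ih =>
    rw [List.pairwise_cons] at hsort
    rw [List.dropWhile_cons]
    by_cases hxi : x < i
    · rw [if_pos (by simpa using hxi)]
      exact ih hsort.2
    · rw [if_neg (by simpa using hxi)]
      intro t ht
      rcases List.mem_cons.mp ht with rfl | ht
      · omega
      · have := hsort.1 t ht; omega

-- the stack/array invariant of A's loop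
lemma pvRun_getD (seq : List (Int × Int)) (st next : List Int)
    (hsort : st.Pairwise (· ≤ ·))
    (hst : ∀ t ∈ st, 0 ≤ t ∧ t < next.length)
    (hseq : ∀ p ∈ seq, 0 ≤ p.2 ∧ p.2 < next.length)
    (hnd : (st ++ seq.map (·.2)).Nodup)
    (k : Nat) :
    (pvRun next st seq).getD k 0 =
      ((if (k : Int) ∈ st then pvNgAll (seq.map (·.2)) k else pvNgAfter (seq.map (·.2)) k).getD
        (next.getD k 0)) := by
  induction seq generalizing st next with
  | nil =>
    simp only [pvRun, List.map_nil, pvNgAll, pvNgAfter, List.find?_nil]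
    split <;> rfl
  | cons p rest ih =>
    obtain ⟨a, i⟩ := p
    have hi : 0 ≤ i ∧ i < next.length := hseq (a, i) (by simp)
    simp only [pvRun]
    set P := st.takeWhile (fun t => decide (t < i)) with hP
    set st2 := st.dropWhile (fun t => decide (t < i)) with hst2
    have hsplit : P ++ st2 = st := List.takeWhile_append_dropWhile
    have hst2ge : ∀ t ∈ st2, i ≤ t := pvDropWhile_ge st i hsort
    have hstack : (pvPop next st i).2 = st2 := pvPop_stack next st i
    have hlen : (pvPop next st i).1.length = next.length := pvPop_length next st i
    -- membership bookkeeping from Nodup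
    have hnd2 : (st ++ (i :: rest.map (·.2))).Nodup := by simpa using hnd
    have hndst : st.Nodup := (List.nodup_append.mp hnd2).1
    have hndr : (i :: rest.map (·.2)).Nodup := (List.nodup_append.mp hnd2).2.1
    have hdisj : ∀ x ∈ st, x ∉ (i :: rest.map (·.2)) :=
      fun x hx hm => (List.nodup_append.mp hnd2).2.2 x hx x hm rfl
    have hiS : i ∉ st := fun h => hdisj i h (by simp)
    have hirest : i ∉ rest.map (·.2) := by
      rw [List.nodup_cons] at hndr; exact hndr.1
    -- invariant hypotheses for the tail
    have hsort' : (i :: st2).Pairwise (· ≤ ·) := by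
      rw [List.pairwise_cons]
      exact ⟨hst2ge, hsort.sublist (List.dropWhile_sublist _)⟩
    have hst2sub : st2 ⊆ st := (List.dropWhile_sublist _).subset
    have hst' : ∀ t ∈ i :: st2, 0 ≤ t ∧ t < (pvPop next st i).1.length := by
      intro t ht
      rw [hlen]
      rcases List.mem_cons.mp ht with rfl | ht
      · exact hi
      · exact hst t (hst2sub ht)
    have hseq' : ∀ q ∈ rest, 0 ≤ q.2 ∧ q.2 < (pvPop next st i).1.length := by
      intro q hq; rw [hlen]; exact hseq q (by simp [hq])
    have hnd' : ((i :: st2) ++ rest.map (·.2)).Nodup := by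
      have hsub : List.Sublist (st2 ++ i :: rest.map (·.2)) (st ++ i :: rest.map (·.2)) := by
        rw [← hsplit, List.append_assoc]
        exact List.sublist_append_right _ _
      have h1 : (st2 ++ i :: rest.map (·.2)).Nodup := List.Nodup.sublist hsub hnd2
      exact (List.perm_middle.symm.nodup_iff).mpr h1
    rw [hstack]
    rw [ih (i :: st2) (pvPop next st i).1 hsort' hst' hseq' hnd']
    rw [pvPop_getD next st i k hst]
    rw [← hP]
    -- case analysis on where k sits
    by_cases hkP : (k : Int) ∈ P
    · have hkst : (k : Int) ∈ st := hsplit ▸ List.mem_append_left _ hkP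
      have hki : (k : Int) < i := by
        have := List.takeWhile_subset (l := st) (p := fun t => decide (t < i))
        have hp := List.mem_takeWhile_imp hkP
        simpa using hp
      have hknotst2 : (k : Int) ∉ st2 := fun h => by
        have := hst2ge _ h; omega
      have hkne : (k : Int) ≠ i := by omega
      have hknrest : (k : Int) ∉ rest.map (·.2) := fun h => hdisj _ hkst (by simp [h])
      rw [if_neg (by simp [hkne, hknotst2]), if_pos hkst, if_pos hkP]
      rw [pvNgAfter_not_mem _ _ hknrest]
      simp only [List.map_cons, pvNgAll, List.find?_cons]
      rw [show decide ((k : Int) < i) = true from by simpa using hki]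
      rfl
    · rw [if_neg hkP]
      by_cases hkst2 : (k : Int) ∈ st2
      · have hkst : (k : Int) ∈ st := hst2sub hkst2
        have hik : i ≤ (k : Int) := hst2ge _ hkst2
        have hkne : (k : Int) ≠ i := fun h => hiS (h ▸ hkst)
        rw [if_pos (by simp [hkst2]), if_pos hkst]
        simp only [List.map_cons, pvNgAll, List.find?_cons]
        rw [show decide ((k : Int) < i) = false from by simp; omega]
      · by_cases hki : (k : Int) = i
        · rw [if_pos (by simp [hki]), if_neg (fun h => hiS (hki ▸ h))]
          simp only [List.map_cons, pvNgAfter]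
          rw [if_pos hki.symm]
        · have hkst : (k : Int) ∉ st := by
            rw [← hsplit]
            simp only [List.mem_append]
            tauto
          rw [if_neg (by simp [hki, hkst2]), if_neg hkst]
          simp only [List.map_cons, pvNgAfter]
          rw [if_neg (fun h => hki h.symm)]

-- ngAfter on the key-sorted index sequence produces the key-minimal candidate
lemma pvNgAfter_isBest (arr : List Int) (S : List Int) (k : Int)
    (hmem : ∀ i, i ∈ S ↔ 0 ≤ i ∧ i < arr.length)
    (hpw : S.Pairwise (pvKlt arr))
    (hk : 0 ≤ k) (hkn : k < arr.length) :
    pvIsBest arr k ((pvNgAfter S k).getD (-1)) := by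
  have hnd : S.Nodup :=
    hpw.imp (fun {a b} h => by unfold pvKlt at h; intro he; subst he; omega)
  obtain ⟨u, v, rfl⟩ := List.append_of_mem ((hmem k).mpr ⟨hk, hkn⟩)
  have hku : k ∉ u := by
    have := List.nodup_append.mp hnd
    exact fun h => this.2.2 k h k (by simp) rfl
  have hpw2 := List.pairwise_append.mp hpw
  have hkv : ∀ y ∈ v, pvKlt arr k y := (List.pairwise_cons.mp hpw2.2.1).1
  have hvp : v.Pairwise (pvKlt arr) := (List.pairwise_cons.mp hpw2.2.1).2
  have hcross : ∀ a ∈ u, ∀ b ∈ k :: v, pvKlt arr a b := hpw2.2.2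
  have hmemv : ∀ i, pvCand arr k i → i ∈ v := by
    intro i hc
    obtain ⟨hki, hil, hgv⟩ := hc
    have hiS : i ∈ u ++ k :: v := (hmem i).mpr ⟨by omega, hil⟩
    rcases List.mem_append.mp hiS with h | h
    · refine absurd (hcross i h k (by simp)) ?_
      unfold pvKlt
      omega
    · rcases List.mem_cons.mp h with rfl | h
      · omega
      · exact h
  rw [pvNgAfter_append_not_mem u _ k hku]
  have : pvNgAfter (k :: v) k = pvNgAll v k := by
    simp [pvNgAfter]
  rw [this]
  rcases hf : pvNgAll v k with _ | x
  · -- no element of v after k exceeds k: no candidates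
    left
    refine ⟨rfl, fun i hc => ?_⟩
    have hiv := hmemv i hc
    have := List.find?_eq_none.mp hf i hiv
    simp at this
    obtain ⟨hki, _, _⟩ := hc
    omega
  · right
    obtain ⟨hpx, as, bs, hveq, hfail⟩ := List.find?_eq_some_iff_append.mp hf
    have hkx : k < x := by simpa using hpx
    have hxv : x ∈ v := by rw [hveq]; simp
    have hxS : x ∈ u ++ k :: v := by simp [hxv]
    have hxlen : x < arr.length := ((hmem x).mp hxS).2
    have hklt : pvKlt arr k x := hkv x hxv
    have hcand : pvCand arr k x := ⟨hkx, hxlen, by unfold pvKlt at hklt; omega⟩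
    refine ⟨by simpa using hcand, fun i hc => ?_⟩
    have hiv := hmemv i hc
    rw [hveq] at hiv hvp
    rcases List.mem_append.mp hiv with h | h
    · exact absurd (by simpa using hfail i h) (by obtain ⟨h1, _, _⟩ := hc; omega)
    · rcases List.mem_cons.mp h with rfl | h
      · right; rfl
      · left
        have := List.pairwise_append.mp hvp
        have hxbs := (List.pairwise_cons.mp this.2.1).1
        simpa using hxbs i h

lemma pvSorted2_eq (xs : List (Int × Int)) :
    PySem.List.sorted2 xs (fun q => q.1) (fun q => q.2) =
      PySem.List.sorted xs (fun q => toLex (q.1, q.2)) := by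
  have hbe : (fun (a b : Int × Int) => decide (a.1 < b.1) || (!decide (b.1 < a.1) && decide (a.2 < b.2)))
      = (fun (a b : Int × Int) => decide (toLex (a.1, a.2) < toLex (b.1, b.2))) := by
    funext a b
    rcases lt_trichotomy a.1 b.1 with h|h|h
    · simp [Prod.Lex.toLex_lt_toLex, h]
    · simp [Prod.Lex.toLex_lt_toLex, h]
    · simp [Prod.Lex.toLex_lt_toLex, h]
      omega
  simp [PySem.List.sorted2, PySem.List.sorted, hbe]

-- properties of li
lemma pvLi_pairwise (arr : List Int) :
    (PySem.List.sorted2 ((PySem.List.enumerate arr).map (fun p => (-p.2, p.1)))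
      (fun q => q.1) (fun q => q.2)).Pairwise
      (fun p q => p.1 < q.1 ∨ (p.1 = q.1 ∧ p.2 < q.2)) := by
  rw [pvSorted2_eq]
  have hle := PySem.List.sorted_pairwise
    ((PySem.List.enumerate arr).map (fun p => (-p.2, p.1))) (fun q => toLex (q.1, q.2))
  have hndo : ((PySem.List.enumerate arr).map (fun p => (-p.2, p.1))).Nodup := by
    refine List.Nodup.map ?_ ?_
    · intro a b hab
      simp only [Prod.mk.injEq] at hab
      exact Prod.ext hab.2 (by omega)
    · exact ((PySem.List.pairwise_lt_enumerate arr 0).imp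
        (fun {a b} h => by intro he; subst he; omega))
  have hnds : (PySem.List.sorted ((PySem.List.enumerate arr).map (fun p => (-p.2, p.1)))
      (fun q => toLex (q.1, q.2))).Nodup :=
    (PySem.List.sorted_perm _ _ false).nodup_iff.mpr hndo
  refine (hle.and hnds).imp (fun {a b} h => ?_)
  obtain ⟨hab, hne⟩ := h
  have hlt : toLex (a.1, a.2) < toLex (b.1, b.2) := by
    rcases lt_or_eq_of_le hab with h | h
    · exact h
    · exfalso
      apply hne
      have := toLex.injective h
      exact Prod.ext (congrArg Prod.fst this) (congrArg Prod.snd this)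
  rwa [Prod.Lex.toLex_lt_toLex] at hlt

lemma pvLi_mem (arr : List Int) (p : Int × Int) :
    p ∈ PySem.List.sorted2 ((PySem.List.enumerate arr).map (fun p => (-p.2, p.1)))
      (fun q => q.1) (fun q => q.2) ↔
      ∃ t : Nat, ∃ h : t < arr.length, p = (-arr[t], (t : Int)) := by
  rw [(PySem.List.sorted2_perm _ _ _ _).mem_iff]
  simp only [List.mem_map, PySem.List.mem_enumerate_iff]
  constructor
  · rintro ⟨q, ⟨t, ht, rfl⟩, rfl⟩
    exact ⟨t, ht, by simp⟩
  · rintro ⟨t, ht, rfl⟩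
    exact ⟨((t : Int), arr[t]), ⟨t, ht, by simp⟩, by simp⟩

lemma pvGv_natCast (arr : List Int) (t : Nat) (h : t < arr.length) :
    pvGv arr (t : Int) = arr[t] := by
  simp [pvGv, List.getElem?_eq_getElem h]

lemma pvLi_nodup (arr : List Int) :
    (PySem.List.sorted2 ((PySem.List.enumerate arr).map (fun p => (-p.2, p.1)))
      (fun q => q.1) (fun q => q.2)).Nodup :=
  (pvLi_pairwise arr).imp (fun {a b} h => by intro he; subst he; omega)

lemma pvS_mem (arr : List Int) (i : Int) :
    i ∈ (PySem.List.sorted2 ((PySem.List.enumerate arr).map (fun p => (-p.2, p.1)))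
      (fun q => q.1) (fun q => q.2)).map (·.2) ↔ 0 ≤ i ∧ i < arr.length := by
  simp only [List.mem_map]
  constructor
  · rintro ⟨p, hp, rfl⟩
    obtain ⟨t, ht, rfl⟩ := (pvLi_mem arr p).mp hp
    simp only []
    omega
  · rintro ⟨h0, hl⟩
    refine ⟨(-arr[i.toNat]'(by omega), i), ?_, rfl⟩
    rw [pvLi_mem]
    exact ⟨i.toNat, by omega, by simp; omega⟩

lemma pvS_pairwise (arr : List Int) :
    ((PySem.List.sorted2 ((PySem.List.enumerate arr).map (fun p => (-p.2, p.1)))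
      (fun q => q.1) (fun q => q.2)).map (·.2)).Pairwise (pvKlt arr) := by
  rw [List.pairwise_map]
  refine (pvLi_pairwise arr).imp_of_mem (fun {p q} hp hq h => ?_)
  obtain ⟨tp, htp, rfl⟩ := (pvLi_mem arr p).mp hp
  obtain ⟨tq, htq, rfl⟩ := (pvLi_mem arr q).mp hq
  simp only [] at h ⊢
  unfold pvKlt
  rw [pvGv_natCast arr tp htp, pvGv_natCast arr tq htq]
  omega

-- A's k-th entry is the key-minimal candidate
lemma pvA_isBest (arr : List Int) (k : Nat) (hk : k < arr.length) :
    pvIsBest arr k ((nextLessOrEqualIndex2 arr).getD k 0) := by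
  unfold nextLessOrEqualIndex2
  simp only [PySem.List.len_eq]
  have hnext : ((PySem.List.pyRange 0 ((arr.length : Int)) 1).map (fun _ => (-1:Int)))
      = List.replicate arr.length (-1) := by
    rw [PySem.List.pyRange_zero_natCast, List.map_map]
    exact List.eq_replicate_iff.mpr ⟨by simp, by simp⟩
  rw [hnext]
  rw [pvRun_getD _ [] _ (by simp) (by simp)
    (by
      intro p hp
      obtain ⟨t, ht, rfl⟩ := (pvLi_mem arr p).mp hp
      simp only [List.length_replicate]
      constructor
      · simp
      · simp; omega)
    (by
      simp only [List.nil_append]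
      refine List.Nodup.map_on ?_ (pvLi_nodup arr)
      intro p hp q hq hpq
      obtain ⟨tp, htp, rfl⟩ := (pvLi_mem arr p).mp hp
      obtain ⟨tq, htq, rfl⟩ := (pvLi_mem arr q).mp hq
      simp only [] at hpq
      have : tp = tq := by omega
      subst this
      rfl) k]
  simp only [List.not_mem_nil, if_false]
  have hrep : (List.replicate arr.length (-1 : Int)).getD k 0 = -1 := by
    rw [List.getD_eq_getElem _ _ (by simpa using hk)]
    simp
  rw [hrep]
  exact pvNgAfter_isBest arr _ k (pvS_mem arr) (pvS_pairwise arr) (by omega) (by omega)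

-- ---- B side ----

-- invariant of B's inner scan
lemma pvBest_spec (arr : List Int) (k : Int) (hk : 0 ≤ k) (ps : List (Int × Int))
    (h1 : ∀ p ∈ ps, p.2 = pvGv arr p.1 ∧ k < p.1 ∧ p.1 < arr.length)
    (h2 : ps.Pairwise (fun p q => p.1 < q.1)) :
    (pvBest (pvGv arr k) ps (-1, 0) = (-1, 0) ∧ ∀ p ∈ ps, ¬ p.2 ≤ pvGv arr k) ∨
      (pvBest (pvGv arr k) ps (-1, 0) ∈ ps ∧ (pvBest (pvGv arr k) ps (-1, 0)).2 ≤ pvGv arr k ∧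
        ∀ q ∈ ps, q.2 ≤ pvGv arr k →
          pvKlt arr (pvBest (pvGv arr k) ps (-1, 0)).1 q.1 ∨ (pvBest (pvGv arr k) ps (-1, 0)).1 = q.1) := by
  induction ps using List.reverseRecOn with
  | nil => left; simp [pvBest]
  | append_singleton ps p ih =>
    have h2' := List.pairwise_append.mp h2
    have hps : ∀ q ∈ ps, q.1 < p.1 := fun q hq => h2'.2.2 q hq p (by simp)
    have hp := h1 p (by simp)
    have hstep : pvBest (pvGv arr k) (ps ++ [p]) (-1, 0) =
        (if p.2 ≤ pvGv arr k ∧ ((pvBest (pvGv arr k) ps (-1, 0)).1 = -1 ∨ (pvBest (pvGv arr k) ps (-1, 0)).2 < p.2)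
          then p else pvBest (pvGv arr k) ps (-1, 0)) := by
      unfold pvBest
      rw [List.foldl_append]
      rfl
    rcases ih (fun q hq => h1 q (by simp [hq])) h2'.1 with ⟨hb, hno⟩ | ⟨hbmem, hbgood, hbmin⟩
    · rw [hstep, hb]
      by_cases hgood : p.2 ≤ pvGv arr k
      · rw [if_pos (by simp [hgood])]
        right
        refine ⟨by simp, hgood, fun q hq hqg => ?_⟩
        rcases List.mem_append.mp hq with h | h
        · exact absurd hqg (hno q h)
        · simp at h; subst h; right; rfl
      · rw [if_neg (by simp [hgood])]
        left
        refine ⟨rfl, fun q hq => ?_⟩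
        rcases List.mem_append.mp hq with h | h
        · exact hno q h
        · simp at h; subst h; exact hgood
    · have hbb := h1 _ (List.mem_append_left _ hbmem)
      have hbne : (pvBest (pvGv arr k) ps (-1, 0)).1 ≠ -1 := by omega
      rw [hstep]
      by_cases hcond : p.2 ≤ pvGv arr k ∧ (pvBest (pvGv arr k) ps (-1, 0)).2 < p.2
      · rw [if_pos (by tauto)]
        right
        refine ⟨by simp, hcond.1, fun q hq hqg => ?_⟩
        rcases List.mem_append.mp hq with h | h
        · -- p beats the old best, which was minimal among ps
          have hq1 := h1 q (List.mem_append_left _ h)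
          rcases hbmin q h hqg with hlt | heq
          · left
            unfold pvKlt at hlt ⊢
            omega
          · left
            rw [← heq]
            unfold pvKlt
            omega
        · simp at h; subst h; right; rfl
      · rw [if_neg (by tauto)]
        right
        refine ⟨by simp [hbmem], hbgood, fun q hq hqg => ?_⟩
        rcases List.mem_append.mp hq with h | h
        · exact hbmin q h hqg
        · simp at h; subst h
          left
          have hblt := hps _ hbmem
          unfold pvKlt
          omega

lemma pvBest_isBest (arr : List Int) (k : Nat) (hk : k < arr.length) :
    pvIsBest arr k
      ((pvBest (arr.getD k 0)
        (PySem.List.enumerate (PySem.List.slice arr (some ((k : Int) + 1)) none) ((k : Int) + 1))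
        (-1, 0)).1) := by
  have hxv : arr.getD k 0 = pvGv arr (k : Int) := by
    rw [List.getD_eq_getElem _ _ hk, pvGv_natCast arr k hk]
  have hslice : PySem.List.slice arr (some ((k : Int) + 1)) none = arr.drop (k + 1) := by
    have hcast : ((k : Int) + 1) = ((k + 1 : Nat) : Int) := by push_cast; ring
    rw [hcast, PySem.List.slice_from_natCast]
  rw [hxv, hslice]
  set ps := PySem.List.enumerate (arr.drop (k + 1)) ((k : Int) + 1) with hps
  have h1 : ∀ p ∈ ps, p.2 = pvGv arr p.1 ∧ (k : Int) < p.1 ∧ p.1 < arr.length := by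
    intro p hp
    obtain ⟨t, ht, rfl⟩ := (PySem.List.mem_enumerate_iff _ _ p).mp hp
    have htl : k + 1 + t < arr.length := by
      have := ht
      simp only [List.length_drop] at this
      omega
    have hfst : ((k : Int) + 1 + (t : Int)) = ((k + 1 + t : Nat) : Int) := by push_cast; ring
    have hval : (arr.drop (k+1))[t] = arr[k+1+t]'htl := List.getElem_drop
    refine ⟨?_, by simp; omega, by simp; omega⟩
    simp only [hval, hfst, pvGv_natCast arr (k+1+t) htl]
  have h2 : ps.Pairwise (fun p q => p.1 < q.1) := PySem.List.pairwise_lt_enumerate _ _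
  have hcover : ∀ i, pvCand arr (k : Int) i → (i, pvGv arr i) ∈ ps := by
    intro i hc
    obtain ⟨hki, hil, _⟩ := hc
    have hi0 : 0 ≤ i := by omega
    have hitl : i.toNat < arr.length := by omega
    have htlen : i.toNat - (k+1) < (arr.drop (k+1)).length := by
      simp only [List.length_drop]
      omega
    refine (PySem.List.mem_enumerate_iff _ _ _).mpr ⟨i.toNat - (k+1), htlen, ?_⟩
    have hval : (arr.drop (k+1))[i.toNat - (k+1)]'htlen = arr[i.toNat]'hitl := by
      rw [List.getElem_drop]
      congr 1
      omega
    rw [Prod.ext_iff]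
    constructor
    · simp only []
      omega
    · simp only [hval]
      simp [pvGv, List.getElem?_eq_getElem hitl]
  rcases pvBest_spec arr (k : Int) (by omega) ps h1 h2 with ⟨hb, hno⟩ | ⟨hmem, hgood, hmin⟩
  · rw [hb]
    left
    refine ⟨rfl, fun i hc => ?_⟩
    exact hno _ (hcover i hc) hc.2.2
  · right
    have hr := h1 _ hmem
    refine ⟨⟨hr.2.1, hr.2.2, by omega⟩, fun i hc => ?_⟩
    have := hmin _ (hcover i hc) hc.2.2
    simpa using this

lemma pvAlt_eq_map (arr : List Int) :
    nextLessOrEqualIndex2_alt arr =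
      (PySem.List.enumerate arr).map
        (fun jx => (pvBest jx.2
          (PySem.List.enumerate (PySem.List.slice arr (some (jx.1 + 1)) none) (jx.1 + 1))
          (-1, 0)).1) := by
  unfold nextLessOrEqualIndex2_alt
  rw [PySem.List.foldl_append_singleton_eq_map]
  simp

lemma pvA_length (arr : List Int) : (nextLessOrEqualIndex2 arr).length = arr.length := by
  unfold nextLessOrEqualIndex2
  rw [pvRun_length]
  simp [PySem.List.len_eq, PySem.List.pyRange_zero_natCast]

-- ===== VERDICT (by name: the statement is the Claim_ definition above) =====
theorem nextLessOrEqualIndex2_spec : Claim_equal_nextLessOrEqualIndex2 := by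
  intro arr _
  unfold Spec_nextLessOrEqualIndex2
  rw [pvAlt_eq_map]
  apply List.ext_getElem
  · rw [pvA_length]
    simp [PySem.List.length_enumerate]
  · intro k hk1 hk2
    have hk : k < arr.length := by rwa [pvA_length] at hk1
    rw [← List.getD_eq_getElem (nextLessOrEqualIndex2 arr) 0 hk1]
    rw [List.getElem_map]
    rw [PySem.List.getElem_enumerate arr 0 k (by rwa [PySem.List.length_enumerate])]
    simp only [zero_add]
    rw [← List.getD_eq_getElem arr 0 hk]
    exact pvIsBest_unique arr (k : Int) _ _ (by omega)
      (pvA_isBest arr k hk) (pvBest_isBest arr k hk)
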